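-- pv_equiv track=rewrite | github.com/Floratania/my_c | backend/leveltest/utils/final_level.py | determine_user_level
-- ===== SOURCE A (Python) =====
-- def determine_user_level(level_percent):
--     levels = ['A1', 'A2', 'B1', 'B2', 'C1', 'C2']
--     for i in reversed(range(len(levels))):
--         lvl = levels[i]
--         if level_percent.get(lvl, 0) >= 60:
--             if all(level_percent.get(prev, 0) >= 60 for prev in levels[:i]):
--                 return lvl
--     for i in reversed(range(len(levels))):
--         lvl = levels[i]
--         if level_percent.get(lvl, 0) >= 50:
--             return lvl
--     return 'A1'
-- ===== SOURCE B (Python) =====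
-- def determine_user_level(level_percent):
--     levels = ['A1', 'A2', 'B1', 'B2', 'C1', 'C2']
--     best = None
--     for lvl in levels:
--         if level_percent.get(lvl, 0) >= 60:
--             best = lvl
--         else:
--             break
--     if best is not None:
--         return best
--     for lvl in reversed(levels):
--         if level_percent.get(lvl, 0) >= 50:
--             return lvl
--     return 'A1'
-- ===== Notes on version B (the rewrite author's own statement) =====
-- stated objective: simpler
-- what changed: Replaces the reverse scan with a quadratic all()-rescan of lower levels by a single forward walk that tracks the last level of the unbroken >=60 prefix and breaks at the first sub-60 level; the >=50 fallback stays a reverse scan.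
import Mathlib
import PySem

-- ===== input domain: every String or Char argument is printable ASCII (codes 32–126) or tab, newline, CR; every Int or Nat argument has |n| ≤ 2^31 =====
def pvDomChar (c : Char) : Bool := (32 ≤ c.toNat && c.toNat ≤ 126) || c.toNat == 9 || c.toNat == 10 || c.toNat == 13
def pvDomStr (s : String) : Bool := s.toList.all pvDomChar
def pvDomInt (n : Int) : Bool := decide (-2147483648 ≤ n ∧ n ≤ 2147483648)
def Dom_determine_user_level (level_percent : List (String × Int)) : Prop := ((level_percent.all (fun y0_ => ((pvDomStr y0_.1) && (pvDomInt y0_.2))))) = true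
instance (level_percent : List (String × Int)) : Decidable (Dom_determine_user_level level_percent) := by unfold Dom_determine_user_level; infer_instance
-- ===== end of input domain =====

-- B replaces A's reverse scan with a per-level all() rescan of the lower levels by one
-- forward walk over the ordered levels that breaks at the first sub-60 level (objective: simpler).

-- shared helper: level_percent.get(lvl, 0) — first-match association-list lookup, default 0
def lpGet (level_percent : List (String × Int)) (k : String) : Int :=
  match level_percent.find? (fun p => p.1 == k) with
  | some p => p.2
  | none => 0

def pvLevels : List String := ["A1", "A2", "B1", "B2", "C1", "C2"]

-- ===== PORT A =====
-- second loop: for i in reversed(range(len(levels))): if get(levels[i],0) >= 50: return levels[i]; then return 'A1'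
def loop2A (level_percent : List (String × Int)) : List Nat → String
  | [] => "A1"
  | i :: rest =>
    let lvl := pvLevels.getD i ""
    if lpGet level_percent lvl ≥ 50 then lvl else loop2A level_percent rest

-- first loop: falls through to the second loop when it never returns
def loop1A (level_percent : List (String × Int)) : List Nat → String
  | [] => loop2A level_percent ((List.range pvLevels.length).reverse)
  | i :: rest =>
    let lvl := pvLevels.getD i ""
    if lpGet level_percent lvl ≥ 60 then
      if (pvLevels.take i).all (fun prev => decide (lpGet level_percent prev ≥ 60)) then lvl
      else loop1A level_percent rest
    else loop1A level_percent rest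

def determine_user_level (level_percent : List (String × Int)) : String :=
  loop1A level_percent ((List.range pvLevels.length).reverse)

-- ===== PORT B =====
-- forward walk: extend `best` while each level is ≥ 60, stop (break) at the first that is not
def fwdWalk (level_percent : List (String × Int)) : List String → Option String → Option String
  | [], best => best
  | lvl :: rest, best =>
    if lpGet level_percent lvl ≥ 60 then fwdWalk level_percent rest (some lvl) else best

-- reversed fallback: first level ≥ 50 when scanning high→low, else 'A1'
def fallback50 (level_percent : List (String × Int)) : List String → String
  | [] => "A1"
  | lvl :: rest => if lpGet level_percent lvl ≥ 50 then lvl else fallback50 level_percent rest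

def determine_user_level_alt (level_percent : List (String × Int)) : String :=
  match fwdWalk level_percent pvLevels none with
  | some b => b
  | none => fallback50 level_percent pvLevels.reverse

-- ===== PRECONDITION & SPEC =====
def Spec_determine_user_level (level_percent : List (String × Int)) (out : String) : Prop := out = determine_user_level_alt level_percent
instance (level_percent : List (String × Int)) (out : String) : Decidable (Spec_determine_user_level level_percent out) := by unfold Spec_determine_user_level; infer_instance

-- ===== CLAIM (what is proved, stated in full; the proofs are below) =====
def Claim_equal_determine_user_level : Prop := ∀ (level_percent : List (String × Int)), Dom_determine_user_level level_percent → Spec_determine_user_level level_percent (determine_user_level level_percent)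

-- ===== LEMMAS AND PROOFS =====
-- the second loop of A and B's reversed fallback are the same high→low ≥50 scan
theorem loop2_eq (lp : List (String × Int)) :
    loop2A lp [5, 4, 3, 2, 1, 0] = fallback50 lp ["C2", "C1", "B2", "B1", "A2", "A1"] := rfl

set_option maxHeartbeats 1000000 in
theorem main_eq (lp : List (String × Int)) :
    determine_user_level lp = determine_user_level_alt lp := by
  unfold determine_user_level determine_user_level_alt
  by_cases h1 : 60 ≤ lpGet lp "A1"
  · by_cases h2 : 60 ≤ lpGet lp "A2"
    · by_cases h3 : 60 ≤ lpGet lp "B1"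
      · by_cases h4 : 60 ≤ lpGet lp "B2"
        · by_cases h5 : 60 ≤ lpGet lp "C1"
          · by_cases h6 : 60 ≤ lpGet lp "C2"
            · simp [show (List.range pvLevels.length).reverse = [5,4,3,2,1,0] from rfl,
    show pvLevels[5]? = some "C2" from rfl, show pvLevels[4]? = some "C1" from rfl,
    show pvLevels[3]? = some "B2" from rfl, show pvLevels[2]? = some "B1" from rfl,
    show pvLevels[1]? = some "A2" from rfl, show pvLevels[0]? = some "A1" from rfl,
    Option.getD_some,
    show pvLevels.take 5 = ["A1","A2","B1","B2","C1"] from rfl,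
    show pvLevels.take 4 = ["A1","A2","B1","B2"] from rfl,
    show pvLevels.take 3 = ["A1","A2","B1"] from rfl,
    show pvLevels.take 2 = ["A1","A2"] from rfl,
    show pvLevels.take 1 = ["A1"] from rfl,
    show pvLevels.take 0 = ([] : List String) from rfl,
    show (fwdWalk lp pvLevels none = if 60 ≤ lpGet lp "A1" then fwdWalk lp ["A2","B1","B2","C1","C2"] (some "A1") else none) from rfl,
    show pvLevels.reverse = ["C2","C1","B2","B1","A2","A1"] from rfl,
    loop1A, fwdWalk, List.all_cons, List.all_nil, Bool.and_eq_true, decide_eq_true_eq,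
    ge_iff_le, and_true, ite_self, h1, h2, h3, h4, h5, h6]
            · simp [show (List.range pvLevels.length).reverse = [5,4,3,2,1,0] from rfl,
    show pvLevels[5]? = some "C2" from rfl, show pvLevels[4]? = some "C1" from rfl,
    show pvLevels[3]? = some "B2" from rfl, show pvLevels[2]? = some "B1" from rfl,
    show pvLevels[1]? = some "A2" from rfl, show pvLevels[0]? = some "A1" from rfl,
    Option.getD_some,
    show pvLevels.take 5 = ["A1","A2","B1","B2","C1"] from rfl,
    show pvLevels.take 4 = ["A1","A2","B1","B2"] from rfl,
    show pvLevels.take 3 = ["A1","A2","B1"] from rfl,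
    show pvLevels.take 2 = ["A1","A2"] from rfl,
    show pvLevels.take 1 = ["A1"] from rfl,
    show pvLevels.take 0 = ([] : List String) from rfl,
    show (fwdWalk lp pvLevels none = if 60 ≤ lpGet lp "A1" then fwdWalk lp ["A2","B1","B2","C1","C2"] (some "A1") else none) from rfl,
    show pvLevels.reverse = ["C2","C1","B2","B1","A2","A1"] from rfl,
    loop1A, fwdWalk, List.all_cons, List.all_nil, Bool.and_eq_true, decide_eq_true_eq,
    ge_iff_le, and_true, ite_self, h1, h2, h3, h4, h5, h6]
          · simp [show (List.range pvLevels.length).reverse = [5,4,3,2,1,0] from rfl,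
    show pvLevels[5]? = some "C2" from rfl, show pvLevels[4]? = some "C1" from rfl,
    show pvLevels[3]? = some "B2" from rfl, show pvLevels[2]? = some "B1" from rfl,
    show pvLevels[1]? = some "A2" from rfl, show pvLevels[0]? = some "A1" from rfl,
    Option.getD_some,
    show pvLevels.take 5 = ["A1","A2","B1","B2","C1"] from rfl,
    show pvLevels.take 4 = ["A1","A2","B1","B2"] from rfl,
    show pvLevels.take 3 = ["A1","A2","B1"] from rfl,
    show pvLevels.take 2 = ["A1","A2"] from rfl,
    show pvLevels.take 1 = ["A1"] from rfl,
    show pvLevels.take 0 = ([] : List String) from rfl,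
    show (fwdWalk lp pvLevels none = if 60 ≤ lpGet lp "A1" then fwdWalk lp ["A2","B1","B2","C1","C2"] (some "A1") else none) from rfl,
    show pvLevels.reverse = ["C2","C1","B2","B1","A2","A1"] from rfl,
    loop1A, fwdWalk, List.all_cons, List.all_nil, Bool.and_eq_true, decide_eq_true_eq,
    ge_iff_le, and_true, ite_self, h1, h2, h3, h4, h5]
        · simp [show (List.range pvLevels.length).reverse = [5,4,3,2,1,0] from rfl,
    show pvLevels[5]? = some "C2" from rfl, show pvLevels[4]? = some "C1" from rfl,
    show pvLevels[3]? = some "B2" from rfl, show pvLevels[2]? = some "B1" from rfl,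
    show pvLevels[1]? = some "A2" from rfl, show pvLevels[0]? = some "A1" from rfl,
    Option.getD_some,
    show pvLevels.take 5 = ["A1","A2","B1","B2","C1"] from rfl,
    show pvLevels.take 4 = ["A1","A2","B1","B2"] from rfl,
    show pvLevels.take 3 = ["A1","A2","B1"] from rfl,
    show pvLevels.take 2 = ["A1","A2"] from rfl,
    show pvLevels.take 1 = ["A1"] from rfl,
    show pvLevels.take 0 = ([] : List String) from rfl,
    show (fwdWalk lp pvLevels none = if 60 ≤ lpGet lp "A1" then fwdWalk lp ["A2","B1","B2","C1","C2"] (some "A1") else none) from rfl,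
    show pvLevels.reverse = ["C2","C1","B2","B1","A2","A1"] from rfl,
    loop1A, fwdWalk, List.all_cons, List.all_nil, Bool.and_eq_true, decide_eq_true_eq,
    ge_iff_le, and_true, ite_self, h1, h2, h3, h4]
      · simp [show (List.range pvLevels.length).reverse = [5,4,3,2,1,0] from rfl,
    show pvLevels[5]? = some "C2" from rfl, show pvLevels[4]? = some "C1" from rfl,
    show pvLevels[3]? = some "B2" from rfl, show pvLevels[2]? = some "B1" from rfl,
    show pvLevels[1]? = some "A2" from rfl, show pvLevels[0]? = some "A1" from rfl,
    Option.getD_some,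
    show pvLevels.take 5 = ["A1","A2","B1","B2","C1"] from rfl,
    show pvLevels.take 4 = ["A1","A2","B1","B2"] from rfl,
    show pvLevels.take 3 = ["A1","A2","B1"] from rfl,
    show pvLevels.take 2 = ["A1","A2"] from rfl,
    show pvLevels.take 1 = ["A1"] from rfl,
    show pvLevels.take 0 = ([] : List String) from rfl,
    show (fwdWalk lp pvLevels none = if 60 ≤ lpGet lp "A1" then fwdWalk lp ["A2","B1","B2","C1","C2"] (some "A1") else none) from rfl,
    show pvLevels.reverse = ["C2","C1","B2","B1","A2","A1"] from rfl,
    loop1A, fwdWalk, List.all_cons, List.all_nil, Bool.and_eq_true, decide_eq_true_eq,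
    ge_iff_le, and_true, ite_self, h1, h2, h3]
    · simp [show (List.range pvLevels.length).reverse = [5,4,3,2,1,0] from rfl,
    show pvLevels[5]? = some "C2" from rfl, show pvLevels[4]? = some "C1" from rfl,
    show pvLevels[3]? = some "B2" from rfl, show pvLevels[2]? = some "B1" from rfl,
    show pvLevels[1]? = some "A2" from rfl, show pvLevels[0]? = some "A1" from rfl,
    Option.getD_some,
    show pvLevels.take 5 = ["A1","A2","B1","B2","C1"] from rfl,
    show pvLevels.take 4 = ["A1","A2","B1","B2"] from rfl,
    show pvLevels.take 3 = ["A1","A2","B1"] from rfl,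
    show pvLevels.take 2 = ["A1","A2"] from rfl,
    show pvLevels.take 1 = ["A1"] from rfl,
    show pvLevels.take 0 = ([] : List String) from rfl,
    show (fwdWalk lp pvLevels none = if 60 ≤ lpGet lp "A1" then fwdWalk lp ["A2","B1","B2","C1","C2"] (some "A1") else none) from rfl,
    show pvLevels.reverse = ["C2","C1","B2","B1","A2","A1"] from rfl,
    loop1A, fwdWalk, List.all_cons, List.all_nil, Bool.and_eq_true, decide_eq_true_eq,
    ge_iff_le, and_true, ite_self, h1, h2]
  · simp [show (List.range pvLevels.length).reverse = [5,4,3,2,1,0] from rfl,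
    show pvLevels[5]? = some "C2" from rfl, show pvLevels[4]? = some "C1" from rfl,
    show pvLevels[3]? = some "B2" from rfl, show pvLevels[2]? = some "B1" from rfl,
    show pvLevels[1]? = some "A2" from rfl, show pvLevels[0]? = some "A1" from rfl,
    Option.getD_some,
    show pvLevels.take 5 = ["A1","A2","B1","B2","C1"] from rfl,
    show pvLevels.take 4 = ["A1","A2","B1","B2"] from rfl,
    show pvLevels.take 3 = ["A1","A2","B1"] from rfl,
    show pvLevels.take 2 = ["A1","A2"] from rfl,
    show pvLevels.take 1 = ["A1"] from rfl,
    show pvLevels.take 0 = ([] : List String) from rfl,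
    show (fwdWalk lp pvLevels none = if 60 ≤ lpGet lp "A1" then fwdWalk lp ["A2","B1","B2","C1","C2"] (some "A1") else none) from rfl,
    show pvLevels.reverse = ["C2","C1","B2","B1","A2","A1"] from rfl,
    loop1A, fwdWalk, List.all_cons, List.all_nil, Bool.and_eq_true, decide_eq_true_eq,
    ge_iff_le, and_true, ite_self, h1, loop2_eq lp]

-- ===== VERDICT (by name: the statement is the Claim_ definition above) =====
theorem determine_user_level_spec : Claim_equal_determine_user_level := by
  intro lp _
  exact main_eq lp
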